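-- pv_equiv track=rewrite | github.com/RandumbWilliam/advent-of-code | 2024/day9/main.py | __get_space_count
-- ===== SOURCE A (Python) =====
-- def __get_space_count(blocks):
--     result = []
--     i = 0
--     while i < len(blocks):
--         if blocks[i] == ".":
--             start = i
--             count = 0
--             while i < len(blocks) and blocks[i] == ".":
--                 count += 1
--                 i += 1
--             result.append((start, count))
--         else:
--             i += 1
--
--     return result
-- ===== SOURCE B (Python) =====
-- def __get_space_count(blocks):
--     # single pass: j sweeps the positions 1..n; a run boundary is j == n or a
--     # change of element; at each boundary close the current run [start, j)
--     result = []
--     start = 0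
--     n = len(blocks)
--     for j in range(1, n + 1):
--         if j == n or blocks[j] != blocks[j - 1]:
--             if blocks[start] == ".":
--                 result.append((start, j - start))
--             start = j
--     return result
-- ===== Notes on version B (the rewrite author's own statement) =====
-- stated objective: alternative
-- what changed: Replaces A's index-driven while loop with a dot-only inner counting loop by a single boundary-scan pass: one non-nested for-loop over positions 1..n that closes the current run whenever the element changes (or the list ends), appending (start, length) for '.' runs.
import Mathlib
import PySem

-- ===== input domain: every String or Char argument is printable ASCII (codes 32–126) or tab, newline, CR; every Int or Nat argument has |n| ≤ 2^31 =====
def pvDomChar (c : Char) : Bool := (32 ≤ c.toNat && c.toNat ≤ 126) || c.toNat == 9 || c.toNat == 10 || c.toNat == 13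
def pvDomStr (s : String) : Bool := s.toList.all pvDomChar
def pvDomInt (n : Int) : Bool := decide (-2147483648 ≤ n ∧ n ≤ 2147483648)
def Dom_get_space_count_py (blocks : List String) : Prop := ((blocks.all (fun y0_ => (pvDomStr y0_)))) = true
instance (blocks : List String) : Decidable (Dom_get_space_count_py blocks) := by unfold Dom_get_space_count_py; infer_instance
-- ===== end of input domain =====

-- B replaces A's nested while loops by a single boundary-scan pass over positions 1..n (objective: alternative decomposition, same O(n) cost).


-- ===== PORT A =====
-- inner while: 'while i < len(blocks) and blocks[i] == ".": count += 1; i += 1'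
-- (fuel = blocks.length + 1 only makes the loop total; it never runs out)
def gscInner (blocks : List String) : Nat → Nat → Nat → Nat × Nat
  | 0, i, count => (count, i)
  | fuel + 1, i, count =>
    if h : i < blocks.length then
      if blocks[i] = "." then gscInner blocks fuel (i + 1) (count + 1)
      else (count, i)
    else (count, i)

-- outer while over the index i (same fuel guard; i strictly increases each iteration)
def gscLoopA (blocks : List String) : Nat → Nat → List (Int × Int)
  | 0, _ => []
  | fuel + 1, i =>
    if h : i < blocks.length then
      if blocks[i] = "." then
        match gscInner blocks (blocks.length + 1) i 0 with
        | (count, i2) => ((i : Int), (count : Int)) :: gscLoopA blocks fuel i2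
      else gscLoopA blocks fuel (i + 1)
    else []

def get_space_count_py (blocks : List String) : List (Int × Int) :=
  gscLoopA blocks (blocks.length + 1) 0

-- ===== PORT B =====
-- single pass over positions 1..n: close the current run [start, j) at each boundary
def gscStep (blocks : List String) (st : Nat × List (Int × Int)) (j : Nat) :
    Nat × List (Int × Int) :=
  if j = blocks.length ∨ ¬ blocks.getD j "" = blocks.getD (j - 1) "" then
    (j, if blocks.getD st.1 "" = "." then
          st.2 ++ [((st.1 : Int), ((j - st.1 : Nat) : Int))]
        else st.2)
  else st

def get_space_count_py_alt (blocks : List String) : List (Int × Int) :=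
  ((List.range' 1 blocks.length).foldl (gscStep blocks) (0, [])).2

-- ===== PRECONDITION & SPEC =====
def Spec_get_space_count_py (blocks : List String) (out : List (Int × Int)) : Prop := out = get_space_count_py_alt blocks
instance (blocks : List String) (out : List (Int × Int)) : Decidable (Spec_get_space_count_py blocks out) := by unfold Spec_get_space_count_py; infer_instance

-- ===== CLAIM (what is proved, stated in full; the proofs are below) =====
def Claim_equal_get_space_count_py : Prop := ∀ (blocks : List String), Dom_get_space_count_py blocks → Spec_get_space_count_py blocks (get_space_count_py blocks)

-- ===== LEMMAS AND PROOFS =====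

-- proof-side intermediate: the run-peeling view of the run structure (used only in proofs)
def gscGoB : Nat → List String → Int → List (Int × Int)
  | 0, _, _ => []
  | _ + 1, [], _ => []
  | fuel + 1, c :: t, i =>
    let k := 1 + (t.takeWhile (fun x => x == c)).length
    let tail := gscGoB fuel (t.drop (k - 1)) (i + (k : Int))
    if c == "." then (i, (k : Int)) :: tail else tail

-- the inner while counts exactly the run of "." starting at i (given enough fuel)
theorem gscInner_eq (blocks : List String) :
    ∀ (fuel i count : Nat), blocks.length ≤ i + fuel →
    gscInner blocks fuel i count =
      (count + ((blocks.drop i).takeWhile (fun x => x == ".")).length,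
       i + ((blocks.drop i).takeWhile (fun x => x == ".")).length) := by
  intro fuel
  induction fuel with
  | zero =>
    intro i count hf
    have : blocks.drop i = [] := List.drop_eq_nil_of_le (by omega)
    simp [gscInner, this]
  | succ fuel ih =>
    intro i count hf
    rw [gscInner]
    by_cases h : i < blocks.length
    · have hdrop : blocks.drop i = blocks[i] :: blocks.drop (i + 1) :=
        List.drop_eq_getElem_cons h
      by_cases hd : blocks[i] = "."
      · rw [dif_pos h, if_pos hd, ih (i + 1) (count + 1) (by omega), hdrop, hd]
        simp only [List.takeWhile_cons, beq_self_eq_true, if_pos, List.length_cons,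
          Prod.mk.injEq]
        omega
      · rw [dif_pos h, if_neg hd, hdrop]
        simp [hd]
    · have : blocks.drop i = [] := List.drop_eq_nil_of_le (by omega)
      simp [h, this]

-- B's pass does not depend on the fuel, as long as it is sufficient
theorem gscGoB_fuel (f1 : Nat) :
    ∀ (f2 : Nat) (l : List String) (i : Int), l.length ≤ f1 → l.length ≤ f2 →
    gscGoB f1 l i = gscGoB f2 l i := by
  induction f1 with
  | zero =>
    intro f2 l i h1 _
    have : l = [] := List.eq_nil_of_length_eq_zero (by omega)
    subst this
    cases f2 <;> simp [gscGoB]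
  | succ f1 ih =>
    intro f2 l i h1 h2
    match l with
    | [] => cases f2 <;> simp [gscGoB]
    | c :: t =>
      match f2 with
      | 0 => simp at h2
      | f2 + 1 =>
        rw [gscGoB, gscGoB]
        have hdl : (t.drop ((t.takeWhile (fun x => x == c)).length)).length ≤ t.length := by
          simp [List.length_drop]
        simp only [List.length_cons] at h1 h2
        rw [ih f2 (t.drop (1 + (t.takeWhile (fun x => x == c)).length - 1)) _
          (by simp only [Nat.add_comm 1, Nat.add_sub_cancel]; omega)
          (by simp only [Nat.add_comm 1, Nat.add_sub_cancel]; omega)]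

-- skipping one element of a non-dot run is invisible to the grouping pass
theorem gscGoB_skip (c : String) (t : List String) (i : Int) (fuel : Nat)
    (hc : ¬ c = ".") (hf : t.length ≤ fuel) :
    gscGoB (fuel + 1) (c :: t) i = gscGoB fuel t (i + 1) := by
  match t with
  | [] =>
    rw [gscGoB]
    cases fuel <;> simp [gscGoB, hc]
  | d :: t' =>
    match fuel with
    | 0 => simp at hf
    | fuel + 1 =>
      by_cases hd : d = c
      · subst hd
        rw [gscGoB, gscGoB]
        simp only [List.takeWhile_cons, beq_self_eq_true, if_pos, List.length_cons,
          beq_iff_eq, hc, if_neg, not_false_iff]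
        have h1 : 1 + ((t'.takeWhile (fun x => x == d)).length + 1) - 1 =
            (1 + (t'.takeWhile (fun x => x == d)).length - 1) + 1 := by omega
        rw [h1, List.drop_succ_cons]
        have htw : (t'.takeWhile (fun x => x == d)).length ≤ t'.length :=
          (t'.takeWhile_sublist _).length_le
        simp only [List.length_cons] at hf
        rw [gscGoB_fuel (fuel + 1) fuel _ _
          (by simp only [Nat.add_comm 1, Nat.add_sub_cancel, List.length_drop]; omega)
          (by simp only [Nat.add_comm 1, Nat.add_sub_cancel, List.length_drop]; omega)]
        congr 1
        push_cast
        ring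
      · rw [gscGoB]
        have htw0 : ((d :: t').takeWhile (fun x => x == c)) = [] := by
          simp [hd]
        simp [htw0, hc]

-- main invariant: A's outer loop at index i equals B's pass on the suffix from i
theorem gscLoop_eq (blocks : List String) :
    ∀ (fuel i : Nat), blocks.length < i + fuel →
    gscLoopA blocks fuel i = gscGoB (blocks.length - i) (blocks.drop i) (i : Int) := by
  intro fuel
  induction fuel with
  | zero =>
    intro i hf
    have h0 : blocks.length - i = 0 := by omega
    have : blocks.drop i = [] := List.drop_eq_nil_of_le (by omega)
    simp [gscLoopA, gscGoB, h0, this]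
  | succ fuel ih =>
    intro i hf
    rw [gscLoopA]
    by_cases h : i < blocks.length
    · have hdrop : blocks.drop i = blocks[i] :: blocks.drop (i + 1) :=
        List.drop_eq_getElem_cons h
      by_cases hd : blocks[i] = "."
      · rw [dif_pos h, if_pos hd]
        have htw : (blocks.drop i).takeWhile (fun x => x == ".") =
            "." :: ((blocks.drop (i + 1)).takeWhile (fun x => x == ".")) := by
          rw [hdrop, hd]; simp
        have hp : gscInner blocks (blocks.length + 1) i 0 =
            (((blocks.drop (i + 1)).takeWhile (fun x => x == ".")).length + 1,
             i + (((blocks.drop (i + 1)).takeWhile (fun x => x == ".")).length + 1)) := by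
          rw [gscInner_eq blocks (blocks.length + 1) i 0 (by omega), htw]
          simp only [List.length_cons, Prod.mk.injEq]
          simp
        rw [hp]
        simp only []
        have hlen1 : ((blocks.drop (i + 1)).takeWhile (fun x => x == ".")).length ≤
            (blocks.drop (i + 1)).length := ((blocks.drop (i + 1)).takeWhile_sublist _).length_le
        have hdl : (blocks.drop (i + 1)).length = blocks.length - (i + 1) := by
          simp [List.length_drop]
        rw [ih _ (by omega)]
        have hm : blocks.length - i =
            (blocks.length - (i + 1)) + 1 := by omega
        rw [hm, hdrop, hd, gscGoB]
        simp only [beq_self_eq_true, if_pos, List.drop_drop]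
        rw [gscGoB_fuel _ (blocks.length - (i + 1)) _ _
          (by simp only [List.length_drop]; omega)
          (by simp only [List.length_drop]; omega)]
        congr 2 <;> first
          | omega
          | (congr 1; omega)
      · rw [dif_pos h, if_neg hd, ih (i + 1) (by omega), hdrop]
        have hm : blocks.length - i = (blocks.length - (i + 1)) + 1 := by omega
        rw [hm, gscGoB_skip _ _ _ _ hd (by simp only [List.length_drop]; omega)]
        congr 1
    · have h0 : blocks.length - i = 0 := by omega
      have hnil : blocks.drop i = [] := List.drop_eq_nil_of_le (by omega)
      simp [h, h0, hnil, gscGoB]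


-- the element right after the takeWhile prefix fails the predicate
theorem pvTakeWhileStop {a : Type} (p : a → Bool) :
    ∀ (l : List a) (h : (l.takeWhile p).length < l.length),
    p (l[(l.takeWhile p).length]'h) = false := by
  intro l
  induction l with
  | nil => intro h; simp at h
  | cons x t ih =>
    intro h
    by_cases hp : p x
    · simp only [List.takeWhile_cons, hp, if_pos, List.length_cons] at h ⊢
      simpa using ih (by simpa using h)
    · simp [hp]

-- a fold whose step fixes the state is the identity
theorem pvFoldlFix {a b : Type} (f : b → a → b) :
    ∀ (l : List a) (st : b), (∀ x ∈ l, f st x = st) → l.foldl f st = st := by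
  intro l
  induction l with
  | nil => simp
  | cons x t ih =>
    intro st h
    rw [List.foldl_cons, h x (by simp)]
    exact ih st (fun y hy => h y (by simp [hy]))

-- B's boundary-scan fold from position start+1 produces exactly the run-peeling result
theorem fold_run (blocks : List String) : ∀ (fuel start : Nat) (res : List (Int × Int)),
    blocks.length ≤ start + fuel → start ≤ blocks.length →
    (List.range' (start + 1) (blocks.length - start)).foldl (gscStep blocks) (start, res)
      = (blocks.length,
         res ++ gscGoB (blocks.length - start) (blocks.drop start) (start : Int)) := by
  intro fuel
  induction fuel with
  | zero =>
    intro start res h1 h2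
    have hs : start = blocks.length := by omega
    subst hs
    simp [gscGoB]
  | succ fuel ih =>
    intro start res h1 h2
    by_cases hlt : start < blocks.length
    · have hdrop : blocks.drop start = blocks[start] :: blocks.drop (start + 1) :=
        List.drop_eq_getElem_cons hlt
      have hLle : ((blocks.drop (start + 1)).takeWhile
          (fun x => x == blocks[start])).length ≤ blocks.length - (start + 1) := by
        have := ((blocks.drop (start + 1)).takeWhile_sublist
          (fun x => x == blocks[start])).length_le
        simp only [List.length_drop] at this
        omega
      -- the whole run [start, start+1+L) consists of blocks[start]
      have hrun' : ∀ (q' : Nat) (hq : q' < ((blocks.drop (start + 1)).takeWhile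
            (fun x => x == blocks[start])).length),
          (blocks.drop (start + 1))[q']'(by
            have := ((blocks.drop (start + 1)).takeWhile_sublist
              (fun x => x == blocks[start])).length_le
            omega) = blocks[start] := by
        intro q' hq
        have hpre := ((blocks.drop (start + 1)).takeWhile_prefix
          (fun x => x == blocks[start])).getElem hq
        have hmem := List.getElem_mem hq
        have hsat := List.mem_takeWhile_imp hmem
        rw [hpre] at hsat
        simpa using hsat
      have hrun : ∀ (q : Nat), start ≤ q →
          q < start + 1 + ((blocks.drop (start + 1)).takeWhile
            (fun x => x == blocks[start])).length →
          blocks.getD q "" = blocks[start] := by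
        intro q hq1 hq2
        have hqn : q < blocks.length := by omega
        rw [List.getD_eq_getElem _ _ hqn]
        rcases Nat.lt_or_ge q (start + 1) with hcase | hcase
        · have : q = start := by omega
          subst this; rfl
        · have hq' : q - (start + 1) < ((blocks.drop (start + 1)).takeWhile
              (fun x => x == blocks[start])).length := by omega
          have hx := hrun' (q - (start + 1)) hq'
          rw [List.getElem_drop] at hx
          have he : start + 1 + (q - (start + 1)) = q := by omega
          simp only [he] at hx
          exact hx
      have hstop : start + 1 + ((blocks.drop (start + 1)).takeWhile
            (fun x => x == blocks[start])).length < blocks.length →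
          ¬ blocks.getD (start + 1 + ((blocks.drop (start + 1)).takeWhile
            (fun x => x == blocks[start])).length) "" = blocks[start] := by
        intro hjn
        rw [List.getD_eq_getElem _ _ hjn]
        have hLlen : ((blocks.drop (start + 1)).takeWhile
            (fun x => x == blocks[start])).length < (blocks.drop (start + 1)).length := by
          simp only [List.length_drop]; omega
        have hx := pvTakeWhileStop (fun x => x == blocks[start]) (blocks.drop (start + 1)) hLlen
        rw [List.getElem_drop] at hx
        intro hEq
        rw [hEq] at hx
        simp at hx
      -- abbreviations
      set L := ((blocks.drop (start + 1)).takeWhile (fun x => x == blocks[start])).length with hL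
      -- split the range at the boundary j = start + 1 + L
      have hranges : List.range' (start + 1) (blocks.length - start)
          = List.range' (start + 1) L ++
            (start + 1 + L) :: List.range' (start + 1 + L + 1) (blocks.length - (start + 1 + L)) := by
        have hsplitn : blocks.length - start = L + ((blocks.length - (start + 1 + L)) + 1) := by
          omega
        rw [hsplitn, ← List.range'_append_1, List.range'_succ]
      rw [hranges, List.foldl_append]
      -- the interior of the run does not change the state
      have hint : (List.range' (start + 1) L).foldl (gscStep blocks) (start, res)
          = (start, res) := by
        apply pvFoldlFix
        intro p hp
        rw [List.mem_range'_1] at hp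
        have hcond : ¬ (p = blocks.length ∨ ¬ blocks.getD p "" = blocks.getD (p - 1) "") := by
          rw [not_or, not_not]
          constructor
          · omega
          · rw [hrun p (by omega) (by omega), hrun (p - 1) (by omega) (by omega)]
        rw [gscStep, if_neg hcond]
      rw [hint]
      -- the boundary step closes the run
      rw [List.foldl_cons]
      have hbcond : (start + 1 + L) = blocks.length ∨
          ¬ blocks.getD (start + 1 + L) "" = blocks.getD (start + 1 + L - 1) "" := by
        rcases Nat.lt_or_ge (start + 1 + L) blocks.length with hc | hc
        · right
          rw [hrun (start + 1 + L - 1) (by omega) (by omega)]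
          exact hstop hc
        · left; omega
      have hstep : gscStep blocks (start, res) (start + 1 + L)
          = (start + 1 + L,
             res ++ (if blocks[start] = "." then
               [((start : Int), ((start + 1 + L - start : Nat) : Int))] else [])) := by
        rw [gscStep, if_pos hbcond]
        rw [hrun start (by omega) (by omega)]
        by_cases hcdot : blocks[start] = "."
        · simp [hcdot]
        · simp [hcdot]
      rw [hstep]
      rw [ih (start + 1 + L) _ (by omega) (by omega)]
      -- now compute the gscGoB side
      have hm : blocks.length - start = (blocks.length - (start + 1)) + 1 := by omega
      rw [hm, hdrop, gscGoB]
      simp only [← hL, Nat.add_comm 1 L, Nat.add_sub_cancel, List.drop_drop]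
      have hfuel : gscGoB (blocks.length - (start + 1)) (blocks.drop (start + 1 + L))
            ((start : Int) + ((L + 1 : Nat) : Int))
          = gscGoB (blocks.length - (start + 1 + L)) (blocks.drop (start + 1 + L))
            ((start + 1 + L : Nat) : Int) := by
        rw [gscGoB_fuel _ (blocks.length - (start + 1 + L)) _ _
          (by simp only [List.length_drop]; omega)
          (by simp only [List.length_drop]; omega)]
        congr 1
        push_cast
        ring
      by_cases hcdot : blocks[start] = "."
      · rw [if_pos hcdot]
        have hb : (blocks[start] == ".") = true := by simp [hcdot]
        rw [if_pos hb]
        rw [Prod.mk.injEq]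
        constructor
        · rfl
        · rw [hfuel]
          have he2 : (start + 1 + L - start : Nat) = (L + 1 : Nat) := by omega
          rw [he2]
          simp
      · rw [if_neg hcdot]
        have hb : ¬ (blocks[start] == ".") = true := by simp [hcdot]
        rw [if_neg hb]
        rw [Prod.mk.injEq]
        constructor
        · rfl
        · rw [hfuel]
          simp
    · have hs : start = blocks.length := by omega
      subst hs
      simp [gscGoB]

-- ===== VERDICT (by name: the statement is the Claim_ definition above) =====
theorem get_space_count_py_spec : Claim_equal_get_space_count_py := by
  intro blocks _
  unfold Spec_get_space_count_py get_space_count_py get_space_count_py_alt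
  have h1 := gscLoop_eq blocks (blocks.length + 1) 0 (by omega)
  have h2 := fold_run blocks (blocks.length + 1) 0 [] (by omega) (by omega)
  simp only [Nat.sub_zero, List.drop_zero, Nat.cast_zero, Nat.zero_add, List.nil_append] at h1 h2
  rw [h1, h2]
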